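-- pv_equiv track=rewrite | github.com/adaresa/BACKEND | Python/TalTech kursus/07/pyramid.py | make_pyramid
-- ===== SOURCE A (Python) =====
-- def make_pyramid(base: int, char: str) -> list:
--     """
--     Construct a pyramid with given base.
--
--     Pyramid should consist of given chars, all empty spaces in the pyramid list are ' '. Pyramid height depends on base length. Lowest floor consists of base-number chars.
--     Every floor has 2 chars less than the floor lower to it.
--     make_pyramid(3, "A") ->
--     [
--         [' ', 'A', ' '],
--         ['A', 'A', 'A']
--     ]
--     make_pyramid(6, 'a') ->
--     [
--         [' ', ' ', 'a', 'a', ' ', ' '],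
--         [' ', 'a', 'a', 'a', 'a', ' '],
--         ['a', 'a', 'a', 'a', 'a', 'a']
--     ]
--     :param base: int
--     :param char: str
--     :return: list
--     """
--     height = int((base + 1) / 2)
--     middle = int(base / 2)
--     temp = 1
--     if(base % 2 == 0):
--         temp = 2
--     pyramid = [[char if (middle - i - (1 * temp)) < j < (middle + i + 1) else " " for j in range(base)] for i in range(height)]
--     return(pyramid)
-- ===== SOURCE B (Python) =====
-- def make_pyramid(base: int, char: str) -> list:
--     height = (base + 1) // 2
--     result = []
--     for k in range(height):
--         count = base - 2 * (height - 1 - k)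
--         side = (base - count) // 2
--         result.append([" "] * side + [char] * count + [" "] * side)
--     return result
-- ===== Notes on version B (the rewrite author's own statement) =====
-- stated objective: simpler
-- what changed: Replaces the per-cell boolean test inside a nested comprehension (with a parity-dependent temp offset) by per-row count-and-padding arithmetic: each row is built directly as side*[' '] + count*[char] + side*[' '].
import Mathlib
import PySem

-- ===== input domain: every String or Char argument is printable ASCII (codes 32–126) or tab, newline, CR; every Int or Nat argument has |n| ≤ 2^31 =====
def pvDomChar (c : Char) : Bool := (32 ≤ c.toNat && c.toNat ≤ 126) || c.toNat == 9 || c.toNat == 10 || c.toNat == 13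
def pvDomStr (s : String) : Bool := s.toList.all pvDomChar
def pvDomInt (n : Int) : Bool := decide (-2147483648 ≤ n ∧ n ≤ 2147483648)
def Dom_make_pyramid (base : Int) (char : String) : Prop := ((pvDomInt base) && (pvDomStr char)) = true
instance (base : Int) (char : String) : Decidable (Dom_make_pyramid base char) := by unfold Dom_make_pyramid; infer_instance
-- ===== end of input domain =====

-- B replaces A's per-cell boolean test (with a parity-dependent offset) by per-row
-- count-and-padding arithmetic, building each row as pads ++ chars ++ pads (objective: simpler).


-- ===== PORT A =====
-- int((base+1)/2) and int(base/2): exact truncating division on this |base| ≤ 2^31 domain (PySem.Int.truncdiv)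
def make_pyramid (base : Int) (char : String) : List (List String) :=
  let height := PySem.Int.truncdiv (base + 1) 2
  let middle := PySem.Int.truncdiv base 2
  let temp : Int := if PySem.Int.mod base 2 = 0 then 2 else 1
  (PySem.List.pyRange 0 height 1).map (fun i =>
    (PySem.List.pyRange 0 base 1).map (fun j =>
      if middle - i - 1 * temp < j ∧ j < middle + i + 1 then char else " "))

-- ===== PORT B =====
def make_pyramid_alt (base : Int) (char : String) : List (List String) :=
  let height := PySem.Int.floordiv (base + 1) 2
  (PySem.List.pyRange 0 height 1).foldl (fun result k =>
    let count := base - 2 * (height - 1 - k)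
    let side := PySem.Int.floordiv (base - count) 2
    result ++ [PySem.List.pyRepeat [" "] side ++ PySem.List.pyRepeat [char] count ++ PySem.List.pyRepeat [" "] side]) []

-- ===== PRECONDITION & SPEC =====
def Spec_make_pyramid (base : Int) (char : String) (out : List (List String)) : Prop := out = make_pyramid_alt base char
instance (base : Int) (char : String) (out : List (List String)) : Decidable (Spec_make_pyramid base char out) := by unfold Spec_make_pyramid; infer_instance

-- ===== CLAIM (what is proved, stated in full; the proofs are below) =====
def Claim_equal_make_pyramid : Prop := ∀ (base : Int) (char : String), Dom_make_pyramid base char → Spec_make_pyramid base char (make_pyramid base char)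

-- ===== LEMMAS AND PROOFS =====

lemma foldl_push_eq_map {α β : Type} (f : α → β) (l : List α) (acc : List β) :
    l.foldl (fun r x => r ++ [f x]) acc = acc ++ l.map f := by
  induction l generalizing acc with
  | nil => simp
  | cons x xs ih => simp [List.foldl_cons, ih]

lemma map_const_on (a b : Int) (f : Int → String) (v : String)
    (h : ∀ x, a ≤ x → x < b → f x = v) :
    (PySem.List.pyRange a b 1).map f = List.replicate (b - a).toNat v := by
  have h1 : (PySem.List.pyRange a b 1).map f
      = (PySem.List.pyRange a b 1).map (fun _ => v) := by
    apply List.map_congr_left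
    intro x hx
    rw [PySem.List.mem_pyRange_one] at hx
    exact h x hx.1 hx.2
  rw [h1, List.map_const', PySem.List.length_pyRange_one]

lemma row_eq (n lo hi : Int) (c : String)
    (h1 : -1 ≤ lo) (h2 : lo < hi) (h3 : hi ≤ n) :
    (PySem.List.pyRange 0 n 1).map (fun j => if lo < j ∧ j < hi then c else " ")
      = List.replicate (lo + 1).toNat " " ++ List.replicate (hi - lo - 1).toNat c
        ++ List.replicate (n - hi).toNat " " := by
  rw [PySem.List.pyRange_one_append 0 (lo + 1) n (by omega) (by omega),
      PySem.List.pyRange_one_append (lo + 1) hi n (by omega) (by omega)]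
  rw [List.map_append, List.map_append]
  rw [map_const_on (lo + 1) hi _ c (by intro x hx1 hx2; simp; omega),
      map_const_on 0 (lo + 1) _ " " (by intro x hx1 hx2; simp; omega),
      map_const_on hi n _ " " (by intro x hx1 hx2; simp; omega)]
  have e1 : (lo + 1 - 0).toNat = (lo + 1).toNat := by omega
  have e2 : (hi - (lo + 1)).toNat = (hi - lo - 1).toNat := by omega
  rw [e1, e2, List.append_assoc]

theorem make_pyramid_spec : Claim_equal_make_pyramid := by
  intro base char _
  show make_pyramid base char = make_pyramid_alt base char
  simp only [make_pyramid, make_pyramid_alt]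
  by_cases hb : base ≤ 0
  · have hA : PySem.Int.truncdiv (base + 1) 2 ≤ 0 := by
      show (base + 1).tdiv 2 ≤ 0
      rw [Int.tdiv_eq_ediv, show (2:Int).sign = 1 from rfl]
      split_ifs <;> omega
    have hB : PySem.Int.floordiv (base + 1) 2 ≤ 0 := by
      rw [PySem.Int.floordiv_eq_ediv_of_pos (by omega : (0:Int) < 2)]
      omega
    simp only [PySem.List.pyRange_one_eq_nil (by omega : (PySem.Int.truncdiv (base + 1) 2) ≤ 0),
      PySem.List.pyRange_one_eq_nil (by omega : (PySem.Int.floordiv (base + 1) 2) ≤ 0)]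
    simp
  · replace hb : 0 < base := by omega
    have h2 : (0:Int) < 2 := by omega
    have hAeq : PySem.Int.truncdiv (base + 1) 2 = (base + 1) / 2 :=
      Int.tdiv_eq_ediv_of_nonneg (by omega)
    have hBeq : PySem.Int.floordiv (base + 1) 2 = (base + 1) / 2 := PySem.Int.floordiv_eq_ediv_of_pos h2
    have hMeq : PySem.Int.truncdiv base 2 = base / 2 :=
      Int.tdiv_eq_ediv_of_nonneg (by omega)
    have hmod : PySem.Int.mod base 2 = base % 2 := PySem.Int.mod_eq_emod_of_pos h2
    rw [hAeq, hBeq, hMeq, hmod, foldl_push_eq_map]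
    simp only [List.nil_append]
    apply List.map_congr_left
    intro i hi
    rw [PySem.List.mem_pyRange_one] at hi
    set h := (base + 1) / 2 with hh
    clear_value h
    have hhb : 2 * h = base + 1 ∨ 2 * h = base := by omega
    set count := base - 2 * (h - 1 - i) with hcount
    clear_value count
    have hside : PySem.Int.floordiv (base - count) 2 = h - 1 - i := by
      rw [show base - count = (h - 1 - i) * 2 by omega]
      rw [PySem.Int.floordiv_eq_ediv_of_pos h2]
      omega
    rw [hside]
    simp only [PySem.List.pyRepeat_singleton]
    by_cases he : base % 2 = 0
    · simp only [if_pos he]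
      rw [row_eq base (base / 2 - i - 1 * 2) (base / 2 + i + 1) char (by omega) (by omega) (by omega)]
      have e1 : (base / 2 - i - 1 * 2 + 1).toNat = (h - 1 - i).toNat := by omega
      have e2 : (base / 2 + i + 1 - (base / 2 - i - 1 * 2) - 1).toNat = count.toNat := by omega
      have e3 : (base - (base / 2 + i + 1)).toNat = (h - 1 - i).toNat := by omega
      rw [e1, e2, e3]
    · simp only [if_neg he]
      rw [row_eq base (base / 2 - i - 1 * 1) (base / 2 + i + 1) char (by omega) (by omega) (by omega)]
      have e1 : (base / 2 - i - 1 * 1 + 1).toNat = (h - 1 - i).toNat := by omega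
      have e2 : (base / 2 + i + 1 - (base / 2 - i - 1 * 1) - 1).toNat = count.toNat := by omega
      have e3 : (base - (base / 2 + i + 1)).toNat = (h - 1 - i).toNat := by omega
      rw [e1, e2, e3]
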